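-- pv_equiv track=rewrite | github.com/tuctiki/delorean | scripts/research/archived/mine_leadership_signals.py | _parse_and_translate
-- ===== SOURCE A (Python) =====
-- def _parse_and_translate(expr, replacements):
--     if '(' not in expr:
--         # Match literal replacements for solo terms if any (e.g. neg(X0))
--         return expr
--
--     func_name_end = expr.index('(')
--     func_name = expr[:func_name_end]
--
--     count = 0
--     args_start = func_name_end + 1
--     args_end = -1
--     for i, char in enumerate(expr[args_start:], start=args_start):
--         if char == '(': count += 1
--         elif char == ')':
--             count -= 1
--             if count == -1:
--                 args_end = i
--                 break
--     if args_end == -1: return expr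
--
--     args_str = expr[args_start:args_end]
--     args = []
--     current_arg = []
--     depth = 0
--     for char in args_str:
--         if char == ',' and depth == 0:
--             args.append("".join(current_arg).strip())
--             current_arg = []
--         else:
--             if char == '(': depth += 1
--             if char == ')': depth -= 1
--             current_arg.append(char)
--     args.append("".join(current_arg).strip())
--
--     trans_args = [_parse_and_translate(a, replacements) for a in args]
--
--     if func_name in replacements:
--         mapped = replacements[func_name]
--         if mapped in ['+', '-', '*', '/']:
--             return f"({trans_args[0]} {mapped} {trans_args[1]})"
--         elif mapped == 'Inv':
--             return f"(1 / ({trans_args[0]}))"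
--         elif mapped == '-1*':
--             return f"(-1 * ({trans_args[0]}))"
--         else:
--             return f"{mapped}({', '.join(trans_args)})"
--     else:
--         return f"{func_name.capitalize()}({', '.join(trans_args)})"
-- ===== SOURCE B (Python) =====
-- # B: two-phase rewrite — a parser building an AST (leaf = raw fragment, node = (name, children))
-- # in one fused paren/comma scan, then a separate recursive translator over the AST.
-- def _parse(expr):
--     if '(' not in expr:
--         return expr
--     name, rest = expr.split('(', 1)
--     args, cur, depth = [], [], 0
--     for ch in rest:
--         if ch == ')' and depth == 0:
--             args.append(''.join(cur))
--             return (name, [_parse(a.strip()) for a in args])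
--         if ch == ',' and depth == 0:
--             args.append(''.join(cur))
--             cur = []
--         else:
--             if ch == '(':
--                 depth += 1
--             elif ch == ')':
--                 depth -= 1
--             cur.append(ch)
--     return expr  # no matching ')': keep the raw fragment verbatim
--
--
-- def _translate(ast, replacements):
--     if isinstance(ast, str):
--         return ast
--     name, children = ast
--     trans = [_translate(c, replacements) for c in children]
--     if name in replacements:
--         mapped = replacements[name]
--         if mapped in ('+', '-', '*', '/'):
--             return f"({trans[0]} {mapped} {trans[1]})"
--         if mapped == 'Inv':
--             return f"(1 / ({trans[0]}))"
--         if mapped == '-1*':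
--             return f"(-1 * ({trans[0]}))"
--         return f"{mapped}({', '.join(trans)})"
--     return f"{name.capitalize()}({', '.join(trans)})"
--
--
-- def _parse_and_translate(expr, replacements):
--     return _translate(_parse(expr), replacements)
-- ===== Notes on version B (the rewrite author's own statement) =====
-- stated objective: alternative
-- what changed: B splits A's single recursive function into a parser that builds an AST with ONE fused paren-matching/comma-splitting scan (A makes two separate scans: find the matching ')' first, then re-scan the slice for depth-0 commas) and a separate recursive translator over the AST.
-- outside the precondition, e.g. on _parse_and_translate('f(a, b)add(1)', {'add': '+'}): A returns 'F(a, b)', B returns 'F(a, b)'; on _parse_and_translate('g(add(1)', {'add': '+'}): A returns 'g(add(1)', B returns 'g(add(1)'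
import Mathlib
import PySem

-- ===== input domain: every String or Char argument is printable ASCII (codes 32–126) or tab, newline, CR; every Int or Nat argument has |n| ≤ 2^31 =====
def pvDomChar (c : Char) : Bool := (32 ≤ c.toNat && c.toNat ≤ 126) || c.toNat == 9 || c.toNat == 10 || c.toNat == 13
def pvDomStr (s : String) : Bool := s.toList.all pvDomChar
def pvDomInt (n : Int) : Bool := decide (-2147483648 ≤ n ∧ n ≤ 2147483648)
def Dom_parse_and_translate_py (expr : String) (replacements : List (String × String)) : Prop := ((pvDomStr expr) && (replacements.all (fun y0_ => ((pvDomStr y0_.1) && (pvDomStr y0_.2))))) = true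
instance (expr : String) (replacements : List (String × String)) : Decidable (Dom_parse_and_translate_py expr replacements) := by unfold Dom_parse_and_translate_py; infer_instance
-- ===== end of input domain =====

-- B re-decomposes A: a parser building an AST with ONE fused paren/comma scan, then a separate
-- recursive translator over the AST; same return value as A, similar cost (objective: alternative).

-- str.capitalize() on the ASCII domain (used by both Pythons via the builtin)
def pvCapitalize : List Char → List Char
  | [] => []
  | c :: r => PySem.Chars.upperChar c :: PySem.Chars.lower r

-- ===== PORT A =====
-- A's first scan: find the ')' matching the opening paren; returns the slice expr[args_start:args_end]
-- directly (the same value A slices out after recording args_end); none = A's args_end == -1.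
def pvAClose : List Char → Int → Option (List Char)
  | [], _ => none
  | c :: r, count =>
    if c = '(' then (pvAClose r (count + 1)).map (c :: ·)
    else if c = ')' then
      if count - 1 = -1 then some []
      else (pvAClose r (count - 1)).map (c :: ·)
    else (pvAClose r count).map (c :: ·)

-- A's second scan: split args_str on depth-0 commas, stripping each piece (args/current_arg/depth loop).
def pvASplit : List Char → Int → List Char → List (List Char) → List (List Char)
  | [], _, cur, acc => acc ++ [PySem.Chars.strip cur]
  | c :: r, depth, cur, acc =>
    if c = ',' ∧ depth = 0 then pvASplit r depth [] (acc ++ [PySem.Chars.strip cur])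
    else pvASplit r (depth + (if c = '(' then 1 else 0) + (if c = ')' then -1 else 0)) (cur ++ [c]) acc

-- A's recursion, fuel = one unit per nesting level (each argument is a strict substring, so
-- expr.length + 1 at the top call is always enough; the fuel-0 branch is never reached from it).
-- trans_args[0]/trans_args[1] are Python list indexing: where Python would raise IndexError
-- (an infix mapping applied to fewer than two arguments) the port uses getD; Pre_ excludes those inputs.
def pvACore (d : PySem.Dict String String) : Nat → List Char → List Char
  | 0, e => e
  | fuel + 1, e =>
    if PySem.Chars.isIn ['('] e then
      match pvAClose ((e.dropWhile (· ≠ '(')).tail) 0 with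
      | none => e
      | some body =>
        let name := e.takeWhile (· ≠ '(')
        let trans := (pvASplit body 0 [] []).map (fun a => pvACore d fuel a)
        match d.get? (String.ofList name) with
        | some mapped =>
          if mapped ∈ (["+", "-", "*", "/"] : List String) then
            ['('] ++ trans.getD 0 [] ++ [' '] ++ mapped.toList ++ [' '] ++ trans.getD 1 [] ++ [')']
          else if mapped = "Inv" then "(1 / (".toList ++ trans.getD 0 [] ++ "))".toList
          else if mapped = "-1*" then "(-1 * (".toList ++ trans.getD 0 [] ++ "))".toList
          else mapped.toList ++ ['('] ++ PySem.Chars.join ", ".toList trans ++ [')']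
        | none => pvCapitalize name ++ ['('] ++ PySem.Chars.join ", ".toList trans ++ [')']
    else e

def parse_and_translate_py (expr : String) (replacements : List (String × String)) : String :=
  String.ofList (pvACore (PySem.Dict.ofList replacements) (expr.toList.length + 1) expr.toList)

-- ===== PORT B =====
-- B's single fused scan: walks rest once, collecting depth-0 comma pieces, and returns them
-- the moment the matching ')' is met at depth 0; none = unbalanced (Source B falls off the loop).
def pvBScan : List Char → Int → List Char → List (List Char) → Option (List (List Char))
  | [], _, _, _ => none
  | c :: r, depth, cur, acc =>
    if c = ')' ∧ depth = 0 then some (acc ++ [cur])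
    else if c = ',' ∧ depth = 0 then pvBScan r depth [] (acc ++ [cur])
    else pvBScan r (depth + (if c = '(' then 1 else 0) + (if c = ')' then -1 else 0)) (cur ++ [c]) acc

mutual
inductive PvAst : Type
  | leaf : List Char → PvAst
  | node : List Char → PvAstL → PvAst
inductive PvAstL : Type
  | nil : PvAstL
  | cons : PvAst → PvAstL → PvAstL
end

mutual
def pvParse : Nat → List Char → PvAst
  | 0, e => .leaf e
  | fuel + 1, e =>
    if PySem.Chars.isIn ['('] e then
      match pvBScan ((e.dropWhile (· ≠ '(')).tail) 0 [] [] with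
      | some raw => .node (e.takeWhile (· ≠ '(')) (pvParseL fuel raw)
      | none => .leaf e
    else .leaf e
def pvParseL : Nat → List (List Char) → PvAstL
  | _, [] => .nil
  | fuel, a :: rest => .cons (pvParse fuel (PySem.Chars.strip a)) (pvParseL fuel rest)
end

mutual
def pvTrans (d : PySem.Dict String String) : PvAst → List Char
  | .leaf s => s
  | .node name ch =>
    let trans := pvTransL d ch
    match d.get? (String.ofList name) with
    | some mapped =>
      if mapped ∈ (["+", "-", "*", "/"] : List String) then
        ['('] ++ trans.getD 0 [] ++ [' '] ++ mapped.toList ++ [' '] ++ trans.getD 1 [] ++ [')']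
      else if mapped = "Inv" then "(1 / (".toList ++ trans.getD 0 [] ++ "))".toList
      else if mapped = "-1*" then "(-1 * (".toList ++ trans.getD 0 [] ++ "))".toList
      else mapped.toList ++ ['('] ++ PySem.Chars.join ", ".toList trans ++ [')']
    | none => pvCapitalize name ++ ['('] ++ PySem.Chars.join ", ".toList trans ++ [')']
def pvTransL (d : PySem.Dict String String) : PvAstL → List (List Char)
  | .nil => []
  | .cons a r => pvTrans d a :: pvTransL d r
end

def parse_and_translate_py_alt (expr : String) (replacements : List (String × String)) : String :=
  String.ofList (pvTrans (PySem.Dict.ofList replacements) (pvParse (expr.toList.length + 1) expr.toList))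

-- ===== PRECONDITION & SPEC =====
-- pvBal s j: the first j characters of s carry as many '(' as ')' (the scan depth there is 0).
def pvBal (s : List Char) (j : Nat) : Prop := (s.take j).count '(' = (s.take j).count ')'

-- pvTwoArgs s: in s, a ',' at paren-depth 0 comes before any ')' at paren-depth 0 (or there is
-- no depth-0 ')' at all): the argument list opened just before s has at least two top-level
-- arguments, or never closes.
def pvTwoArgs (s : List Char) : Prop :=
  (∃ j : Fin s.length, s.get j = ',' ∧ pvBal s j.val ∧
      ∀ k : Fin s.length, k.val < j.val → ¬(s.get k = ')' ∧ pvBal s k.val)) ∨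
  (∀ k : Fin s.length, ¬(s.get k = ')' ∧ pvBal s k.val))

-- Pre_ excludes only inputs where expr contains a call "n(" of a name n mapped to an infix
-- operator whose argument list closes without a top-level comma (fewer than two arguments): on
-- those inputs A raises IndexError at trans_args[1] — except when such an occurrence lies in
-- trailing or unbalanced text A discards, where both A and B return it verbatim (see cites).
def Pre_parse_and_translate_py (expr : String) (replacements : List (String × String)) : Prop :=
  ∀ p ∈ replacements, p.2 ∈ (["+", "-", "*", "/"] : List String) →
    ∀ i : Fin expr.toList.length,
      (p.1.toList ++ ['(']).isPrefixOf (expr.toList.drop i.val) = true →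
      pvTwoArgs (expr.toList.drop (i.val + p.1.toList.length + 1))
instance (expr : String) (replacements : List (String × String)) : Decidable (Pre_parse_and_translate_py expr replacements) := by unfold Pre_parse_and_translate_py pvTwoArgs pvBal; infer_instance

def pvWitness_parse_and_translate_py : String × (List (String × String)) :=
  ("add(sub(a, b), c)", [("add", "+"), ("sub", "-")])

def Spec_parse_and_translate_py (expr : String) (replacements : List (String × String)) (out : String) : Prop := out = parse_and_translate_py_alt expr replacements
instance (expr : String) (replacements : List (String × String)) (out : String) : Decidable (Spec_parse_and_translate_py expr replacements out) := by unfold Spec_parse_and_translate_py; infer_instance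

-- ===== CLAIM (what is proved, stated in full; the proofs are below) =====
def Claim_equal_parse_and_translate_py : Prop := ∀ (expr : String) (replacements : List (String × String)), Dom_parse_and_translate_py expr replacements → Pre_parse_and_translate_py expr replacements → Spec_parse_and_translate_py expr replacements (parse_and_translate_py expr replacements)

-- ===== LEMMAS AND PROOFS =====

-- Proof-only: A's comma split WITHOUT the strip (strip is factored out so the fused scan of B,
-- which strips later, can be related to A's two passes).
def pvRawSplit : List Char → Int → List Char → List (List Char) → List (List Char)
  | [], _, cur, acc => acc ++ [cur]
  | c :: r, depth, cur, acc =>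
    if c = ',' ∧ depth = 0 then pvRawSplit r depth [] (acc ++ [cur])
    else pvRawSplit r (depth + (if c = '(' then 1 else 0) + (if c = ')' then -1 else 0)) (cur ++ [c]) acc

lemma pvASplit_raw : ∀ (cs : List Char) (n : Int) (cur : List Char) (acc : List (List Char)),
    pvASplit cs n cur (acc.map PySem.Chars.strip) = (pvRawSplit cs n cur acc).map PySem.Chars.strip := by
  intro cs
  induction cs with
  | nil => intro n cur acc; simp [pvASplit, pvRawSplit]
  | cons c r ih =>
    intro n cur acc
    by_cases h : c = ',' ∧ n = 0
    · obtain ⟨hc, hn⟩ := h; subst hc; subst hn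
      have := ih 0 [] (acc ++ [cur])
      simp only [List.map_append, List.map_cons, List.map_nil] at this
      simp [pvASplit, pvRawSplit, this]
    · simp [pvASplit, pvRawSplit, h, ih]

lemma pvFuse : ∀ (cs : List Char) (n : Int) (cur : List Char) (acc : List (List Char)),
    pvBScan cs n cur acc = (pvAClose cs n).map (fun body => pvRawSplit body n cur acc) := by
  intro cs
  induction cs with
  | nil => intros; simp [pvBScan, pvAClose]
  | cons c r ih =>
    intro n cur acc
    by_cases hop : c = '('
    · subst hop
      cases hA : pvAClose r (n + 1) <;>
        simp [pvBScan, pvAClose, pvRawSplit, hA, ih]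
    · by_cases hcl : c = ')'
      · subst hcl
        by_cases hz : n = 0
        · subst hz; simp [pvBScan, pvAClose, pvRawSplit]
        · have hne : ¬ (n - 1 = -1) := by omega
          have harith : n + -1 = n - 1 := by omega
          cases hA : pvAClose r (n - 1) <;>
            simp [pvBScan, pvAClose, pvRawSplit, hz, hne, harith, hA, ih]
      · by_cases hcm : c = ','
        · subst hcm
          by_cases hz : n = 0
          · subst hz
            cases hA : pvAClose r 0 <;> simp [pvBScan, pvAClose, pvRawSplit, hA, ih]
          · cases hA : pvAClose r n <;> simp [pvBScan, pvAClose, pvRawSplit, hz, hA, ih]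
        · cases hA : pvAClose r n <;>
            simp [pvBScan, pvAClose, pvRawSplit, hop, hcl, hcm, hA, ih]

lemma pvTransL_parseL (d : PySem.Dict String String) (fuel : Nat) :
    ∀ raw : List (List Char),
      pvTransL d (pvParseL fuel raw) = raw.map (fun a => pvTrans d (pvParse fuel (PySem.Chars.strip a))) := by
  intro raw
  induction raw with
  | nil => simp [pvParseL, pvTransL]
  | cons a rest ih => simp [pvParseL, pvTransL, ih]

lemma pvMain (d : PySem.Dict String String) :
    ∀ (fuel : Nat) (e : List Char), pvACore d fuel e = pvTrans d (pvParse fuel e) := by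
  intro fuel
  induction fuel with
  | zero => intro e; simp [pvACore, pvParse, pvTrans]
  | succ fuel ih =>
    intro e
    by_cases hin : PySem.Chars.isIn ['('] e = true
    · simp only [pvACore, pvParse, hin, if_true]
      rw [pvFuse]
      cases hA : pvAClose ((List.dropWhile (fun x => !decide (x = '(')) e).tail) 0 with
      | none => simp [pvTrans, hA]
      | some body =>
        have hS := pvASplit_raw body 0 [] []
        simp only [List.map_nil] at hS
        simp [pvTrans, pvTransL_parseL, hS, List.map_map, Function.comp_def, ih, hA]
    · simp [pvACore, pvParse, pvTrans, hin]

-- ===== VERDICT (by name: the statement is the Claim_ definition above) =====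
theorem parse_and_translate_py_spec : Claim_equal_parse_and_translate_py := by
  intro expr replacements _ _
  unfold Spec_parse_and_translate_py parse_and_translate_py parse_and_translate_py_alt
  rw [pvMain]
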